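-- pv_equiv track=rewrite | github.com/kstratto/CodeWars | Completed Kata/Social_Golfer_Problem_Validator.py | once_per_day
-- ===== SOURCE A (Python) =====
-- def once_per_day(schedule):
--     """
--     Parameters
--     ----------
--     schedule : Array of strings (all capital letters)
--         Each character represents a golfer.
--         Each string represents a group of players.
--         Each row represents a day of golf.
--
--     Returns
--     -------
--     True if each golfer is scheduled exactly once per day.
--     False otherwise.
--     """
--     try:
--         initial_roster = set("".join(schedule[0]))
--     except IndexError:
--         return True
--     for row in schedule:
--         scheduled_golfers = set()
--         for group in row:
--             # Check golfers who are double-scheduled on a given day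
--             if len(scheduled_golfers.intersection(set(group))) > 0:
--                 return False
--             else:
--                 scheduled_golfers.update(set(group))
--         # Check to make sure golfers for day match initial roster
--         if scheduled_golfers != initial_roster:
--             return False
--     return True
-- ===== SOURCE B (Python) =====
-- def once_per_day(schedule):
--     if not schedule:
--         return True
--     roster = sorted(set("".join(schedule[0])))
--     for row in schedule:
--         day = sorted(c for group in row for c in set(group))
--         if day != roster:
--             return False
--     return True
-- ===== Notes on version B (the rewrite author's own statement) =====
-- stated objective: alternative
-- what changed: A maintains a running union set per day and rejects via group-by-group intersection tests followed by a set-equality with the roster; B instead flattens each day's per-group deduplicated characters into one list, sorts it, and compares it for list equality with the sorted roster, which simultaneously detects cross-group duplicates and roster mismatches.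
import Mathlib
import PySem

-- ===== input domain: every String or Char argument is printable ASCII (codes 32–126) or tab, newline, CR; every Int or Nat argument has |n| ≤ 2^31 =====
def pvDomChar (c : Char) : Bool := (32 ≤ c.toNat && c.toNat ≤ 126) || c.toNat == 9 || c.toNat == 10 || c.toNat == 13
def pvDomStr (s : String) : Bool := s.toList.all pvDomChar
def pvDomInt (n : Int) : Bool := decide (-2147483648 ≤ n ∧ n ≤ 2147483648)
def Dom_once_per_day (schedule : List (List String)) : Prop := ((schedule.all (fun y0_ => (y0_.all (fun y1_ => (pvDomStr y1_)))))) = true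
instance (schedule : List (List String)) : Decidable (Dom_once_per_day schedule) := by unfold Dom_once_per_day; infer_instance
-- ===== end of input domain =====

-- B replaces A's incremental union-with-intersection-tests by a sort-and-compare check:
-- each day's per-group deduplicated characters, flattened and sorted, must equal the
-- sorted roster. Alternative algorithm, same behaviour.

-- ===== PORT A =====
-- A's inner loop over a day's groups: early 'return False' on a non-empty intersection,
-- then the roster comparison after the loop.
def onceRowA (initial : PySem.Set Char) : List String → PySem.Set Char → Bool
  | [], sched => PySem.Set.equal sched initial
  | g :: rest, sched =>
    let gs : PySem.Set Char := PySem.Set.ofList g.toList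
    if 0 < PySem.Set.len (PySem.Set.inter sched gs) then false
    else onceRowA initial rest (PySem.Set.update sched gs)

-- A's outer loop over days, with its early 'return False'.
def onceDaysA (initial : PySem.Set Char) : List (List String) → Bool
  | [] => true
  | row :: rest =>
    if onceRowA initial row PySem.Set.empty then onceDaysA initial rest else false

def once_per_day (schedule : List (List String)) : Bool :=
  match schedule with
  | [] => true  -- schedule[0] raises IndexError: 'return True'
  | first :: _ =>
    let initial : PySem.Set Char := PySem.Set.ofList (PySem.Str.join "" first).toList
    onceDaysA initial schedule

-- ===== PORT B =====
-- B's day list: the characters of the day, deduplicated per group, flattened.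
def dayList (row : List String) : List Char :=
  row.flatMap (fun g => (PySem.Set.ofList g.toList : List Char))

-- B's loop over days: sort the day's characters, compare with the sorted roster.
def daysB (roster : List Char) : List (List String) → Bool
  | [] => true
  | row :: rest =>
    if PySem.List.sorted (dayList row) (fun x => x) false ≠ roster then false
    else daysB roster rest

def once_per_day_alt (schedule : List (List String)) : Bool :=
  match schedule with
  | [] => true
  | first :: _ =>
    let roster : List Char :=
      PySem.List.sorted (PySem.Set.ofList (PySem.Str.join "" first).toList : List Char)
        (fun x => x) false
    daysB roster schedule

-- ===== PRECONDITION & SPEC =====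
def Spec_once_per_day (schedule : List (List String)) (out : Bool) : Prop := out = once_per_day_alt schedule
instance (schedule : List (List String)) (out : Bool) : Decidable (Spec_once_per_day schedule out) := by unfold Spec_once_per_day; infer_instance

-- ===== CLAIM (what is proved, stated in full; the proofs are below) =====
def Claim_equal_once_per_day : Prop := ∀ (schedule : List (List String)), Dom_once_per_day schedule → Spec_once_per_day schedule (once_per_day schedule)

-- ===== LEMMAS AND PROOFS =====

-- A's row loop, from any Nodup accumulator u, succeeds iff u followed by the day's
-- per-group-deduplicated characters is duplicate-free and covers exactly `initial`.
theorem rowA_iff (initial : PySem.Set Char) (groups : List String) :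
    ∀ (u : PySem.Set Char), u.Nodup →
      (onceRowA initial groups u = true ↔
        ((u ++ dayList groups).Nodup ∧ ∀ x, (x ∈ u ++ dayList groups ↔ x ∈ initial))) := by
  induction groups with
  | nil =>
    intro u hu
    simp [onceRowA, dayList, PySem.Set.equal_iff, hu]
  | cons g rest ih =>
    intro u hu
    have hg : (PySem.Set.ofList g.toList : List Char).Nodup := PySem.Set.nodup_ofList _
    simp only [onceRowA]
    by_cases hi : PySem.Set.inter u (PySem.Set.ofList g.toList) = []
    · -- disjoint group: A recurses on u ++ gs
      have hd : ∀ x ∈ (PySem.Set.ofList g.toList : List Char), x ∉ u := by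
        intro x hx hxu
        have : x ∈ PySem.Set.inter u (PySem.Set.ofList g.toList) := by
          simp only [PySem.Set.inter, List.mem_filter, PySem.Set.contains_eq_listContains]
          exact ⟨hxu, by simpa using hx⟩
        simp [hi] at this
      have hupd : PySem.Set.update u (PySem.Set.ofList g.toList)
          = u ++ PySem.Set.ofList g.toList :=
        PySem.Set.update_eq_append_of_disjoint u _ hg hd
      have hcond : ¬ (0 < PySem.Set.len (PySem.Set.inter u (PySem.Set.ofList g.toList))) := by
        simp [PySem.Set.len, hi]
      rw [if_neg hcond]
      have hnodup : (u ++ (PySem.Set.ofList g.toList : List Char)).Nodup := by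
        rw [List.nodup_append]
        refine ⟨hu, hg, ?_⟩
        intro a hau b hbg heq
        exact hd b hbg (heq ▸ hau)
      have := ih (PySem.Set.update u (PySem.Set.ofList g.toList)) (hupd ▸ hnodup)
      rw [this, hupd]
      simp [dayList, List.append_assoc]
    · -- overlapping group: A returns False; the flattened day has a duplicate
      obtain ⟨x, hx⟩ := List.exists_mem_of_ne_nil _ hi
      have hxu : x ∈ u := (List.mem_filter.mp hx).1
      have hxg : x ∈ (PySem.Set.ofList g.toList : List Char) := by
        have := (List.mem_filter.mp hx).2
        simpa [PySem.Set.contains_iff] using this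
      have hcond : 0 < PySem.Set.len (PySem.Set.inter u (PySem.Set.ofList g.toList)) := by
        simp only [PySem.Set.len]
        exact_mod_cast List.length_pos_of_mem hx
      rw [if_pos hcond]
      constructor
      · intro h; exact absurd h (by simp)
      · rintro ⟨hnd, -⟩
        exfalso
        have hdisj := List.disjoint_of_nodup_append hnd
        exact hdisj hxu (by simp [dayList, hxg])

-- B's day check is the same condition, for a Nodup `initial`.
theorem rowB_iff (initial : PySem.Set Char) (hinit : initial.Nodup) (row : List String) :
    (PySem.List.sorted (dayList row) (fun x => x) false
        = PySem.List.sorted initial (fun x => x) false ↔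
      ((dayList row).Nodup ∧ ∀ x, (x ∈ dayList row ↔ x ∈ initial))) := by
  rw [PySem.List.sorted_id_eq_sorted_id_iff_perm]
  constructor
  · intro hp
    exact ⟨hp.nodup_iff.mpr hinit, fun x => hp.mem_iff⟩
  · rintro ⟨hnd, hmem⟩
    exact (List.perm_ext_iff_of_nodup hnd hinit).mpr hmem

-- the two per-row checks agree as Bools
theorem row_eq (initial : PySem.Set Char) (hinit : initial.Nodup) (row : List String) :
    onceRowA initial row PySem.Set.empty
      = decide (PySem.List.sorted (dayList row) (fun x => x) false
          = PySem.List.sorted initial (fun x => x) false) := by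
  rw [Bool.eq_iff_iff]
  have hA := rowA_iff initial row PySem.Set.empty List.nodup_nil
  simp only [PySem.Set.empty, List.nil_append] at hA
  simp only [PySem.Set.empty] at hA ⊢
  rw [hA, decide_eq_true_iff]
  exact (rowB_iff initial hinit row).symm

-- the outer loops agree
theorem days_eq (initial : PySem.Set Char) (hinit : initial.Nodup)
    (rows : List (List String)) :
    onceDaysA initial rows
      = daysB (PySem.List.sorted initial (fun x => x) false) rows := by
  induction rows with
  | nil => rfl
  | cons row rest ih =>
    simp only [onceDaysA, daysB, row_eq initial hinit row, ih, ne_eq, ite_not]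
    split_ifs with h <;> simp_all

-- ===== VERDICT (by name: the statement is the Claim_ definition above) =====
theorem once_per_day_spec : Claim_equal_once_per_day := by
  intro schedule _
  unfold Spec_once_per_day once_per_day once_per_day_alt
  cases schedule with
  | nil => rfl
  | cons first rest =>
    exact days_eq _ (PySem.Set.nodup_ofList _) _
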